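-- pv_equiv track=rewrite | github.com/YuanzheChen/MOOC-Learner-Curated | connectors/new-MITx-files2vismooc-files.py | concat_dict
-- ===== SOURCE A (Python) =====
-- def all_disjoint(sets):
--     union = set()
--     for s in sets:
--         for x in s:
--             if x in union:
--                 return False
--             union.add(x)
--     return True
--
-- def concat_dict(list_of_dict):
--     if not all(isinstance(d, dict) for d in list_of_dict):
--         raise ValueError("Invalid list_of_dict")
--     if not all_disjoint([set(d.keys()) for d in list_of_dict]):
--         raise ValueError("Illegal concatenation of list_of_dict")
--     sd = {}
--     for d in list_of_dict:
--         sd.update(d)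
--     return sd
-- ===== SOURCE B (Python) =====
-- def concat_dict(list_of_dict):
--     if not all(isinstance(d, dict) for d in list_of_dict):
--         raise ValueError("Invalid list_of_dict")
--     merged = {}
--     total = 0
--     for d in list_of_dict:
--         merged.update(d)
--         total += len(d)
--     if len(merged) != total:
--         raise ValueError("Illegal concatenation of list_of_dict")
--     return merged
-- ===== Notes on version B (the rewrite author's own statement) =====
-- stated objective: simpler
-- what changed: Replaces the per-element set-membership scan (all_disjoint with early return over a list of key sets) by a single merge loop that also sums the dict sizes and detects overlapping keys afterwards by comparing the merged dict's cardinality with the total.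
import Mathlib
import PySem

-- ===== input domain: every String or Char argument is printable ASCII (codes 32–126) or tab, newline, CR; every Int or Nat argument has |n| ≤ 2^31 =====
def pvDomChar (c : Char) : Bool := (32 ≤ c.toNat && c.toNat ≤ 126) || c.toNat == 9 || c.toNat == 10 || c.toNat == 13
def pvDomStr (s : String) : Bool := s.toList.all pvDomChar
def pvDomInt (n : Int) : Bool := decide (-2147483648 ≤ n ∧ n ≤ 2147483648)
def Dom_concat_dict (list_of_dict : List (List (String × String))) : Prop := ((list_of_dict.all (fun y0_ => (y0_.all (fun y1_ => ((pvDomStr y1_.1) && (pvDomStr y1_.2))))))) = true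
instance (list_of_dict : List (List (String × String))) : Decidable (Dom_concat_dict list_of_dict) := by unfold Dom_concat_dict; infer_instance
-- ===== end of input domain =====

-- B replaces A's per-element set-membership disjointness scan by a single merge loop that also
-- sums the dict sizes and detects key overlap by a final cardinality comparison (objective: simpler).

-- ===== PORT A =====
-- inner loop of all_disjoint: 'for x in s: if x in union: return False; union.add(x)'
-- (the loop's boolean outcome is independent of the set's iteration order)
def pvAllDisjointInner (s : List String) (union : PySem.Set String) : Option (PySem.Set String) :=
  match s with
  | [] => some union
  | x :: rest => if x ∈ union then none else pvAllDisjointInner rest (PySem.Set.add union x)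

def pvAllDisjoint (sets : List (List String)) (union : PySem.Set String) : Bool :=
  match sets with
  | [] => true
  | s :: rest =>
    match pvAllDisjointInner s union with
    | none => false
    | some union' => pvAllDisjoint rest union'

def concat_dict (list_of_dict : List (List (String × String))) : List (String × String) :=
  -- the isinstance guard is guaranteed by the type; the ValueError raise is outside Pre_
  if pvAllDisjoint (list_of_dict.map (fun d => PySem.Set.ofList (d.map Prod.fst))) [] then
    (list_of_dict.foldl (fun sd d => PySem.Dict.update sd d) PySem.Dict.empty).items
  else []

-- ===== PORT B =====
def concat_dict_alt (list_of_dict : List (List (String × String))) : List (String × String) :=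
  -- one loop: merged.update(d); total += len(d)
  let st := list_of_dict.foldl
    (fun (st : PySem.Dict String String × Int) d => (st.1.update d, st.2 + (d.length : Int)))
    (PySem.Dict.empty, 0)
  -- the ValueError raise on len(merged) != total is outside Pre_
  if (st.1.size : Int) = st.2 then st.1.items else []

-- ===== PRECONDITION & SPEC =====
-- Pre_ excludes exactly the inputs on which Python A raises
-- ValueError("Illegal concatenation of list_of_dict"): dicts with overlapping keys.
def Pre_concat_dict (list_of_dict : List (List (String × String))) : Prop :=
  (list_of_dict.flatMap (fun d => d.map Prod.fst)).Nodup
instance (list_of_dict : List (List (String × String))) : Decidable (Pre_concat_dict list_of_dict) := by unfold Pre_concat_dict; infer_instance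
def pvWitness_concat_dict : (List (List (String × String))) := [[("a", "1"), ("b", "2")], [("c", "3")]]

def Spec_concat_dict (list_of_dict : List (List (String × String))) (out : List (String × String)) : Prop := out = concat_dict_alt list_of_dict
instance (list_of_dict : List (List (String × String))) (out : List (String × String)) : Decidable (Spec_concat_dict list_of_dict out) := by unfold Spec_concat_dict; infer_instance

-- ===== CLAIM (what is proved, stated in full; the proofs are below) =====
def Claim_equal_concat_dict : Prop := ∀ (list_of_dict : List (List (String × String))), Dom_concat_dict list_of_dict → Pre_concat_dict list_of_dict → Spec_concat_dict list_of_dict (concat_dict list_of_dict)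

-- ===== LEMMAS AND PROOFS =====

theorem pv_set_add_not_mem (s : PySem.Set String) (x : String) (h : x ∉ s) :
    PySem.Set.add s x = s ++ [x] := by
  simp [PySem.Set.add, h]

-- folding Set.add over fresh distinct elements appends them in order
theorem pv_foldl_add (s : List String) (acc : PySem.Set String)
    (h : (acc ++ s).Nodup) : s.foldl PySem.Set.add acc = acc ++ s := by
  induction s generalizing acc with
  | nil => simp
  | cons x rest ih =>
    have h' : ((acc ++ [x]) ++ rest).Nodup := by simpa [List.append_assoc] using h
    have hx : x ∉ acc := by
      have hd := (List.nodup_append.mp h).2.2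
      exact fun hmem => hd x hmem x (by simp) rfl
    calc (x :: rest).foldl PySem.Set.add acc
        = rest.foldl PySem.Set.add (PySem.Set.add acc x) := rfl
      _ = rest.foldl PySem.Set.add (acc ++ [x]) := by rw [pv_set_add_not_mem acc x hx]
      _ = (acc ++ [x]) ++ rest := ih _ h'
      _ = acc ++ x :: rest := by simp

theorem pv_ofList_nodup (xs : List String) (h : xs.Nodup) : PySem.Set.ofList xs = xs := by
  simpa using pv_foldl_add xs [] (by simpa using h)

theorem pv_inner_ok (s : List String) (union : PySem.Set String)
    (h : (union ++ s).Nodup) : pvAllDisjointInner s union = some (union ++ s) := by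
  induction s generalizing union with
  | nil => simp [pvAllDisjointInner]
  | cons x rest ih =>
    have h' : ((union ++ [x]) ++ rest).Nodup := by simpa [List.append_assoc] using h
    have hx : x ∉ union := by
      have hd := (List.nodup_append.mp h).2.2
      exact fun hmem => hd x hmem x (by simp) rfl
    calc pvAllDisjointInner (x :: rest) union
        = pvAllDisjointInner rest (PySem.Set.add union x) := by
          simp [pvAllDisjointInner, hx]
      _ = pvAllDisjointInner rest (union ++ [x]) := by rw [pv_set_add_not_mem union x hx]
      _ = some ((union ++ [x]) ++ rest) := ih _ h'
      _ = some (union ++ x :: rest) := by simp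

theorem pv_outer_ok (sets : List (List String)) (union : PySem.Set String)
    (h : (union ++ sets.flatten).Nodup) : pvAllDisjoint sets union = true := by
  induction sets generalizing union with
  | nil => simp [pvAllDisjoint]
  | cons s rest ih =>
    have h' : ((union ++ s) ++ rest.flatten).Nodup := by
      simpa [List.append_assoc] using h
    have hin : pvAllDisjointInner s union = some (union ++ s) :=
      pv_inner_ok s union (h'.sublist (List.sublist_append_left _ _))
    simp [pvAllDisjoint, hin]
    exact ih _ h'

-- the merge loop over dicts with globally distinct keys concatenates their item lists
theorem pv_merge_items (l : List (List (String × String))) (D : PySem.Dict String String)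
    (h : (D.keys ++ l.flatMap (fun d => d.map Prod.fst)).Nodup) :
    (l.foldl (fun sd d => PySem.Dict.update sd d) D).items = D.items ++ l.flatten := by
  induction l generalizing D with
  | nil => simp
  | cons d rest ih =>
    have hre : ((D.keys ++ d.map Prod.fst) ++ rest.flatMap (fun d => d.map Prod.fst)).Nodup := by
      simpa [List.append_assoc] using h
    have hdisj := (List.nodup_append.mp h).2.2
    have hfresh : ∀ p ∈ d, D.contains p.1 = false := by
      intro p hp
      have hmemflat : p.1 ∈ (d :: rest).flatMap (fun d => d.map Prod.fst) := by
        simp only [List.flatMap_cons, List.mem_append]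
        exact Or.inl (List.mem_map_of_mem hp)
      have hnot : p.1 ∉ D.keys := fun hk => hdisj p.1 hk p.1 hmemflat rfl
      simp [PySem.Dict.contains_eq_decide_mem_keys, hnot]
    have hflat2 : ((d.map Prod.fst) ++ rest.flatMap (fun d => d.map Prod.fst)).Nodup := by
      simpa [List.flatMap_cons] using (List.nodup_append.mp h).2.1
    have hnd : (d.map Prod.fst).Nodup := (List.nodup_append.mp hflat2).1
    have hitems : (D.update d).items = D.items ++ d := by
      have := PySem.Dict.items_foldl_insert_fresh d Prod.fst Prod.snd D hfresh hnd
      simpa [PySem.Dict.update] using this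
    have hkeys : (D.update d).keys = D.keys ++ d.map Prod.fst := by
      simp [PySem.Dict.keys, hitems]
    calc ((d :: rest).foldl (fun sd d => PySem.Dict.update sd d) D).items
        = (rest.foldl (fun sd d => PySem.Dict.update sd d) (D.update d)).items := rfl
      _ = (D.update d).items ++ rest.flatten := ih _ (by rw [hkeys]; exact hre)
      _ = D.items ++ (d :: rest).flatten := by simp [hitems]

theorem pv_pair_fold (l : List (List (String × String))) (st0 : PySem.Dict String String × Int) :
    l.foldl (fun (st : PySem.Dict String String × Int) d => (st.1.update d, st.2 + (d.length : Int))) st0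
    = (l.foldl (fun m d => PySem.Dict.update m d) st0.1, st0.2 + ((l.map List.length).sum : Int)) := by
  induction l generalizing st0 with
  | nil => simp
  | cons d rest ih =>
    simp only [List.foldl_cons, ih, List.map_cons, List.sum_cons]
    refine Prod.ext rfl ?_
    push_cast
    ring

-- ===== VERDICT (by name: the statement is the Claim_ definition above) =====
theorem concat_dict_spec : Claim_equal_concat_dict := by
  intro l _ hpre
  unfold Spec_concat_dict concat_dict concat_dict_alt
  have hflat : ((l.map (fun d => d.map Prod.fst)).flatten).Nodup := by
    simpa [List.flatMap_def] using hpre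
  have hsub : ∀ d ∈ l, (d.map Prod.fst).Nodup := by
    intro d hd
    exact (List.sublist_flatten_of_mem (List.mem_map_of_mem hd)).nodup hflat
  have hmapsets : l.map (fun d => PySem.Set.ofList (d.map Prod.fst))
      = l.map (fun d => d.map Prod.fst) :=
    List.map_congr_left (fun d hd => pv_ofList_nodup _ (hsub d hd))
  have hA : pvAllDisjoint (l.map (fun d => PySem.Set.ofList (d.map Prod.fst))) [] = true := by
    rw [hmapsets]
    exact pv_outer_ok _ [] (by simpa using hflat)
  have hmerge : (l.foldl (fun sd d => PySem.Dict.update sd d) PySem.Dict.empty).items = l.flatten := by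
    simpa [PySem.Dict.keys_empty] using
      pv_merge_items l PySem.Dict.empty (by simpa [PySem.Dict.keys_empty] using hpre)
  have hpair := pv_pair_fold l (PySem.Dict.empty, (0 : Int))
  simp only [hA, if_true, hpair]
  have hsize : ((l.foldl (fun m d => PySem.Dict.update m d) PySem.Dict.empty).size : Int)
      = 0 + ((l.map List.length).sum : Int) := by
    simp [PySem.Dict.size, hmerge, List.length_flatten]
  simp [hsize, hmerge]
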